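-- pv_equiv track=rewrite | github.com/jmrothberg/Doom_HTML | tools/export_sprite_atlases.py | grid_axis_segment
-- ===== SOURCE A (Python) =====
-- def grid_axis_segment(total_size: int, parts: int, index: int) -> tuple[int, int]:
--     base = total_size // parts
--     rem = total_size % parts
--     offset = 0
--     for i in range(index):
--         offset += base + (1 if i < rem else 0)
--     size = base + (1 if index < rem else 0)
--     return offset, size
-- ===== SOURCE B (Python) =====
-- def grid_axis_segment(total_size: int, parts: int, index: int) -> tuple[int, int]:
--     q, r = divmod(total_size, parts)
--     if index <= 0:
--         offset = 0
--     elif r <= 0: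
--         offset = index * q
--     elif index <= r:
--         offset = index * (q + 1)
--     else:
--         offset = r * (q + 1) + (index - r) * q
--     return offset, q + (1 if index < r else 0)
-- ===== Notes on version B (the rewrite author's own statement) =====
-- stated objective: faster
-- what changed: Replaces the O(index) accumulation loop with an O(1) four-way case analysis: the first min(index, r) parts have size q+1 and the rest q, so the offset is computed by direct multiplication per case.
import Mathlib
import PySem

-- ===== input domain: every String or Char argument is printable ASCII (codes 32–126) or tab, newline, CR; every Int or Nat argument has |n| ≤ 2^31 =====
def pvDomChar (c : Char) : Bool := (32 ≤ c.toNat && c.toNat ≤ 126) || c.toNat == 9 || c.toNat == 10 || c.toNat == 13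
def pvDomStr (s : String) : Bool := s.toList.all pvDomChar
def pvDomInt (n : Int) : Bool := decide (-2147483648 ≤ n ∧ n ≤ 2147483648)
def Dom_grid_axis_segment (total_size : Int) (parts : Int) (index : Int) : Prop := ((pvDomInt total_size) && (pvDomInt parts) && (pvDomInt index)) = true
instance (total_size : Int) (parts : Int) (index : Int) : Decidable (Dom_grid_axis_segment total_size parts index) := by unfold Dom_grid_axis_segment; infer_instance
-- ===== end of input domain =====

-- B replaces A's O(index) accumulation loop with an O(1) four-way case analysis (objective: faster, asymptotic).


-- ===== PORT A =====
def grid_axis_segment (total_size : Int) (parts : Int) (index : Int) : Int × Int :=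
  let base := PySem.Int.floordiv total_size parts
  let rem := PySem.Int.mod total_size parts
  let offset := (PySem.List.pyRange 0 index 1).foldl
    (fun acc i => acc + (base + (if i < rem then 1 else 0))) 0
  let size := base + (if index < rem then 1 else 0)
  (offset, size)

-- ===== PORT B =====
-- divmod? is none only when parts = 0 (Python raises there; excluded by Pre_)
def grid_axis_segment_alt (total_size : Int) (parts : Int) (index : Int) : Int × Int :=
  match PySem.Int.divmod? total_size parts with
  | none => (0, 0)
  | some (q, r) =>
    let offset :=
      if index ≤ 0 then 0
      else if r ≤ 0 then index * q
      else if index ≤ r then index * (q + 1)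
      else r * (q + 1) + (index - r) * q
    (offset, q + (if index < r then 1 else 0))

-- ===== PRECONDITION & SPEC =====
-- A raises ZeroDivisionError when parts = 0; that is the only excluded input.
def Pre_grid_axis_segment (total_size : Int) (parts : Int) (index : Int) : Prop := parts ≠ 0
instance (total_size : Int) (parts : Int) (index : Int) : Decidable (Pre_grid_axis_segment total_size parts index) := by unfold Pre_grid_axis_segment; infer_instance
def pvWitness_grid_axis_segment : Int × Int × Int := (10, 3, 2)

def Spec_grid_axis_segment (total_size : Int) (parts : Int) (index : Int) (out : Int × Int) : Prop := out = grid_axis_segment_alt total_size parts index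
instance (total_size : Int) (parts : Int) (index : Int) (out : Int × Int) : Decidable (Spec_grid_axis_segment total_size parts index out) := by unfold Spec_grid_axis_segment; infer_instance

-- ===== CLAIM (what is proved, stated in full; the proofs are below) =====
def Claim_equal_grid_axis_segment : Prop := ∀ (total_size : Int) (parts : Int) (index : Int), Dom_grid_axis_segment total_size parts index → Pre_grid_axis_segment total_size parts index → Spec_grid_axis_segment total_size parts index (grid_axis_segment total_size parts index)

-- ===== LEMMAS AND PROOFS =====

theorem pv_loop_closed (base rem : Int) : ∀ (n : Nat),
    (PySem.List.pyRange 0 (n : Int) 1).foldl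
      (fun acc i => acc + (base + (if i < rem then 1 else 0))) 0
    = (n : Int) * base + min (n : Int) (max rem 0) := by
  intro n
  induction n with
  | zero => simp [PySem.List.pyRange_one_eq_nil]
  | succ m ih =>
    have hsplit : PySem.List.pyRange 0 ((m : Int) + 1) 1
        = PySem.List.pyRange 0 (m : Int) 1 ++ [(m : Int)] := by
      exact PySem.List.pyRange_one_succ_right (Int.natCast_nonneg m)
    push_cast
    rw [hsplit, List.foldl_append, ih]
    simp only [List.foldl]
    have hm : ((m : Int) + 1) * base = (m : Int) * base + base := by ring
    rw [hm]
    split_ifs with hlt <;> omega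

theorem pv_loop_cases (base rem index : Int) :
    (PySem.List.pyRange 0 index 1).foldl
      (fun acc i => acc + (base + (if i < rem then 1 else 0))) 0
    = (if index ≤ 0 then 0
       else if rem ≤ 0 then index * base
       else if index ≤ rem then index * (base + 1)
       else rem * (base + 1) + (index - rem) * base) := by
  by_cases h : 0 ≤ index
  · have hn : index = ((index.toNat : Nat) : Int) := by omega
    rw [hn, pv_loop_closed]
    split_ifs with h0 h1 h2
    · have : ((index.toNat : Nat) : Int) = 0 := by omega
      rw [this]; simp
    · have : min ((index.toNat : Nat) : Int) (max rem 0) = 0 := by omega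
      rw [this]; ring
    · have : min ((index.toNat : Nat) : Int) (max rem 0) = ((index.toNat : Nat) : Int) := by omega
      rw [this]; ring
    · have : min ((index.toNat : Nat) : Int) (max rem 0) = rem := by omega
      rw [this]; ring
  · rw [PySem.List.pyRange_one_eq_nil (by omega)]
    simp only [List.foldl_nil]
    rw [if_pos (by omega)]

-- ===== VERDICT (by name: the statement is the Claim_ definition above) =====
theorem grid_axis_segment_spec : Claim_equal_grid_axis_segment := by
  intro t p i _ hp
  show grid_axis_segment t p i = grid_axis_segment_alt t p i
  have hd : PySem.Int.divmod? t p = some (PySem.Int.floordiv t p, PySem.Int.mod t p) := by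
    simp only [PySem.Int.divmod?, PySem.Int.floordiv, PySem.Int.mod]
    exact if_neg hp
  simp only [grid_axis_segment, grid_axis_segment_alt, hd, pv_loop_cases]
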